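-- pv_equiv track=rewrite | github.com/AliBinary/Quera-Answers | problemset/235329.py | solve
-- ===== SOURCE A (Python) =====
-- def solve(phone_number):
--     n = len(phone_number)
--     dp = [0] * (n + 1)
--     dp[n] = 1
--     for i in range(n - 1, -1, -1):
--         if phone_number[i] == '0':
--             dp[i] = 0
--         elif i + 2 <= n and dp[i + 2]:
--             dp[i] = 1
--         elif i + 3 <= n and dp[i + 3]:
--             dp[i] = 1
--     if dp[0] == 0:
--         return "NO", []
--     i = 0
--     res = []
--     while i < n:
--         if i + 2 <= n and dp[i + 2]:
--             res.append(phone_number[i:i + 2])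
--             i += 2
--         else:
--             res.append(phone_number[i:i + 3])
--             i += 3
--     return "YES", res
-- ===== SOURCE B (Python) =====
-- def solve(phone_number):
--     # Forward depth-first search with backtracking: walk left to right taking a
--     # 2-block first and falling back to a 3-block, recording dead-end positions
--     # in `failed` so each position is abandoned at most once (linear time).
--     n = len(phone_number)
--     failed = set()
--     stack = []                 # blocks taken so far, as (start, length)
--     i, k = 0, 2                # current position and block length to try next
--     while i != n:
--         if k <= 3 and i + k <= n and phone_number[i] != '0' and i + k not in failed:
--             stack.append((i, k))
--             i += k
--             k = 2
--         elif k == 2: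
--             k = 3
--         else:
--             failed.add(i)
--             if not stack:
--                 return "NO", []
--             i, k = stack.pop()
--             k += 1
--     return "YES", [phone_number[p:p + l] for p, l in stack]
-- ===== Notes on version B (the rewrite author's own statement) =====
-- stated objective: alternative
-- what changed: A fills a backward feasibility dp array and then replays it in a forward reconstruction loop; B never builds a dp table: it walks the string left-to-right as an iterative depth-first search with an explicit stack of taken blocks, trying a 2-block before a 3-block and backtracking on dead ends, with a failed-position set keeping the search linear.
import Mathlib
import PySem

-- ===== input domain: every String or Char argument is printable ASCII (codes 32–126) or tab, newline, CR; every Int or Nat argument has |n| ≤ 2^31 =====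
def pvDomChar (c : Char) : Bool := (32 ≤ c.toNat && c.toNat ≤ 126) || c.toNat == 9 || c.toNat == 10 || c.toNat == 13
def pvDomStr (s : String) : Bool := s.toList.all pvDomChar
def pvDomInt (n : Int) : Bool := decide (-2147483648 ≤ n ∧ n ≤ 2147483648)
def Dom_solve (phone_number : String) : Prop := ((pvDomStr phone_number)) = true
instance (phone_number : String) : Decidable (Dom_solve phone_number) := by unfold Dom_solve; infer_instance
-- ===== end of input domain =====

-- B replaces A's backward feasibility-dp pass + forward dp-replay loop by a forward
-- backtracking depth-first search with an explicit block stack and a dead-end set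
-- (alternative decomposition, same linear cost).

-- ===== PORT A =====
-- A's dp array is filled strictly back-to-front from dp[n]=1; we build it as a list by
-- prepending, so list index j is dp[j].  'i+2<=n and dp[i+2]' becomes '(tail[1]?).getD 0 ≠ 0'
-- (get? is none exactly when i+2>n, matching the short-circuited bound check).
def dpA : List Char → List Int
  | [] => [1]
  | c :: rest =>
      let tail := dpA rest
      let v : Int :=
        if c = '0' then 0
        else if ((tail[1]?).getD 0) ≠ 0 then 1
        else if ((tail[2]?).getD 0) ≠ 0 then 1
        else 0
      v :: tail

-- A's while loop: dp is the dp entries aligned with the current suffix (dp[i..n]);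
-- advancing i by k drops k chars and k dp entries.  Slices truncate like Python's.
def reconA (dp : List Int) (suf : List Char) : List String :=
  match suf with
  | [] => []
  | c :: cs =>
    if ((dp[2]?).getD 0) ≠ 0 then
      String.ofList ((c :: cs).take 2) :: reconA (dp.drop 2) ((c :: cs).drop 2)
    else
      String.ofList ((c :: cs).take 3) :: reconA (dp.drop 3) ((c :: cs).drop 3)
  termination_by suf.length
  decreasing_by all_goals simp [List.length_drop]

def solve (phone_number : String) : String × List String :=
  let s := phone_number.toList
  let dp := dpA s
  if (dp.headD 0) = 0 then ("NO", [])
  else ("YES", reconA dp s)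

-- ===== PORT B =====
-- Source B's while loop becomes the recursion dfs over the same state (stack, i, k, failed);
-- the branches are in the source's order.  dfsInv/dfsMeas and the meas_* lemmas are the
-- termination device only (Python's 'failed' set grows on every pop, which bounds the walk).
def dfsMeas (s : List Char) (stack : List (Nat × Nat)) (i k : Nat) (failed : Finset Nat) : Nat :=
  (3 * s.length + 4) * (s.length + 1 - failed.card) + 3 * (s.length - i) + (4 - k) + stack.length

def dfsInv (n : Nat) (stack : List (Nat × Nat)) (i k : Nat) (failed : Finset Nat) : Prop :=
  2 ≤ k ∧ i ≤ n ∧ i ∉ failed ∧ (∀ x ∈ failed, x < n) ∧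
  (∀ f ∈ stack, 2 ≤ f.2 ∧ f.1 < i ∧ f.1 ∉ failed) ∧
  (stack.map Prod.fst).Pairwise (fun a b => b < a)

theorem meas_desc (s : List Char) (stack : List (Nat × Nat)) (i k : Nat) (failed : Finset Nat)
    (h2 : 2 ≤ k) (hkn : i + k ≤ s.length) :
    dfsMeas s ((i, k) :: stack) (i + k) 2 failed < dfsMeas s stack i k failed := by
  unfold dfsMeas
  generalize (3 * s.length + 4) * (s.length + 1 - failed.card) = P
  simp only [List.length_cons]
  omega

theorem meas_bump (s : List Char) (stack : List (Nat × Nat)) (i : Nat) (failed : Finset Nat) :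
    dfsMeas s stack i 3 failed < dfsMeas s stack i 2 failed := by
  unfold dfsMeas
  generalize (3 * s.length + 4) * (s.length + 1 - failed.card) = P
  omega

theorem meas_pop (s : List Char) (q kq i k : Nat) (rest : List (Nat × Nat)) (failed : Finset Nat)
    (hni : i ∉ failed) (hb : ∀ x ∈ failed, x < s.length) (hin : i < s.length) :
    dfsMeas s rest q (kq + 1) (insert i failed) < dfsMeas s ((q, kq) :: rest) i k failed := by
  unfold dfsMeas
  have hsub : failed ⊆ Finset.range s.length := by
    intro x hx; simpa [Finset.mem_range] using hb x hx
  have hc : failed.card ≤ s.length := by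
    simpa using Finset.card_le_card hsub
  rw [Finset.card_insert_of_notMem hni]
  have h1 : s.length + 1 - failed.card = (s.length + 1 - (failed.card + 1)) + 1 := by omega
  rw [h1, Nat.mul_succ]
  generalize (3 * s.length + 4) * (s.length + 1 - (failed.card + 1)) = P
  simp only [List.length_cons]
  omega

def dfs (s : List Char) (stack : List (Nat × Nat)) (i k : Nat) (failed : Finset Nat)
    (h : dfsInv s.length stack i k failed) : String × List String :=
  if hn : i = s.length then
    -- 'return "YES", [phone_number[p:p+l] for p,l in stack]'; stack is kept head-first,
    -- Python's append order is its reverse; slices are in range (p+l ≤ n at push time)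
    ("YES", stack.reverse.map (fun f => String.ofList ((s.drop f.1).take f.2)))
  else if hg : k ≤ 3 ∧ i + k ≤ s.length ∧ s[i]? ≠ some '0' ∧ (i + k) ∉ failed then
    dfs s ((i, k) :: stack) (i + k) 2 failed
      (by
        obtain ⟨h2, hin, hif, hfb, hfr, hpw⟩ := h
        refine ⟨by omega, hg.2.1, hg.2.2.2, hfb, ?_, ?_⟩
        · intro f hf
          simp only [List.mem_cons] at hf
          rcases hf with rfl | hf
          · exact ⟨h2, by omega, hif⟩
          · obtain ⟨a, b, c⟩ := hfr f hf; exact ⟨a, by omega, c⟩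
        · simp only [List.map_cons]
          refine List.Pairwise.cons ?_ hpw
          intro b hb
          simp only [List.mem_map] at hb
          obtain ⟨f, hf, rfl⟩ := hb
          exact (hfr f hf).2.1)
  else if hk : k = 2 then
    dfs s stack i 3 failed
      (by obtain ⟨h2, hin, hif, hfb, hfr, hpw⟩ := h; exact ⟨by omega, hin, hif, hfb, hfr, hpw⟩)
  else
    match hst : stack with
    | [] => ("NO", [])
    | (q, kq) :: rest =>
      dfs s rest q (kq + 1) (insert i failed)
        (by
          obtain ⟨h2, hin, hif, hfb, hfr, hpw⟩ := h
          obtain ⟨hkq2, hqi, hqf⟩ := hfr (q, kq) (by simp)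
          have hiltn : i < s.length := by omega
          simp only [List.map_cons] at hpw
          obtain ⟨hqgt, hpw'⟩ := List.pairwise_cons.mp hpw
          refine ⟨by omega, by omega, ?_, ?_, ?_, ?_⟩
          · simp only [Finset.mem_insert]
            push Not
            exact ⟨by omega, hqf⟩
          · intro x hx
            simp only [Finset.mem_insert] at hx
            rcases hx with rfl | hx
            · exact hiltn
            · exact hfb x hx
          · intro f hf
            obtain ⟨a, b, c⟩ := hfr f (by simp [hf])
            refine ⟨a, hqgt f.1 (List.mem_map_of_mem hf), ?_⟩
            simp only [Finset.mem_insert]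
            push Not
            exact ⟨by omega, c⟩
          · exact hpw')
  termination_by dfsMeas s stack i k failed
  decreasing_by
  · exact meas_desc s stack i k failed h.1 hg.2.1
  · subst hk; exact meas_bump s stack i failed
  · have hle := h.2.1; exact meas_pop s q kq i k rest failed h.2.2.1 h.2.2.2.1 (by omega)

def solve_alt (phone_number : String) : String × List String :=
  dfs phone_number.toList [] 0 2 ∅ (by simp [dfsInv])

-- ===== PRECONDITION & SPEC =====
def Spec_solve (phone_number : String) (out : String × List String) : Prop := out = solve_alt phone_number
instance (phone_number : String) (out : String × List String) : Decidable (Spec_solve phone_number out) := by unfold Spec_solve; infer_instance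

-- ===== CLAIM (what is proved, stated in full; the proofs are below) =====
def Claim_equal_solve : Prop := ∀ (phone_number : String), Dom_solve phone_number → Spec_solve phone_number (solve phone_number)

-- ===== LEMMAS AND PROOFS =====

-- Proof-side reference: parts j = the A-greedy partition of the suffix starting at j
-- (or none), built back-to-front exactly like A's dp; entry j of pbB is parts[j].
def pbB : List Char → List (Option (List String))
  | [] => [some []]
  | c :: rest =>
      let tail := pbB rest
      let e : Option (List String) :=
        if c ≠ '0' then
          match tail[1]? with
          | some (some l) => some (String.ofList (c :: rest.take 1) :: l)
          | _ =>
            match tail[2]? with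
            | some (some l) => some (String.ofList (c :: rest.take 2) :: l)
            | _ => none
        else none
      e :: tail

def partsQ (s : List Char) (j : Nat) : Option (List String) := (pbB (s.drop j)).headD none


-- canFrom s i k: from position i with options ≥ k still open, some block can be taken
-- into a feasible suffix (the dfs feasible-branch condition, phrased on partsQ).
def canFrom (s : List Char) (i k : Nat) : Bool :=
  (s[i]? != some '0') &&
    ((decide (k ≤ 2) && decide (i + 2 ≤ s.length) && (partsQ s (i + 2)).isSome) ||
     (decide (k ≤ 3) && decide (i + 3 ≤ s.length) && (partsQ s (i + 3)).isSome))

-- the answer dfs is about to produce, as a function of the surviving stack alone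
def finalAns (s : List Char) (stack : List (Nat × Nat)) (i k : Nat) : String × List String :=
  if i = s.length ∨ canFrom s i k = true then
    ("YES", stack.reverse.map (fun f => String.ofList ((s.drop f.1).take f.2)) ++ (partsQ s i).getD [])
  else
    match stack with
    | [] => ("NO", [])
    | (q, kq) :: rest => finalAns s rest q (kq + 1)

-- the chain invariant of the dfs stack: consecutive frames link up, every taken block
-- is legal, and a 3-block was only ever taken after its 2-alternative was ruled out
def Linked (s : List Char) : List (Nat × Nat) → Nat → Prop
  | [], _ => True
  | (q, kq) :: rest, i => q + kq = i ∧ s[q]? ≠ some '0' ∧ (kq = 2 ∨ kq = 3) ∧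
      (kq = 3 → s.length < q + 2 ∨ partsQ s (q + 2) = none) ∧ Linked s rest q

theorem pbB_length (s : List Char) : (pbB s).length = s.length + 1 := by
  induction s with
  | nil => simp [pbB]
  | cons c rest ih => simp [pbB, ih]

theorem pbB_drop (s : List Char) (k : Nat) (hk : k ≤ s.length) :
    (pbB s).drop k = pbB (s.drop k) := by
  induction s generalizing k with
  | nil =>
    have hk0 : k = 0 := Nat.le_zero.mp hk
    subst hk0
    simp
  | cons c rest ih =>
    cases k with
    | zero => simp
    | succ k =>
      have : (pbB (c :: rest)).drop (k + 1) = (pbB rest).drop k := by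
        simp [pbB]
      rw [this, ih k (by simpa using hk)]
      simp

theorem pbB_get_head (s : List Char) (k : Nat) (hk : k ≤ s.length) :
    (pbB s)[k]? = (pbB (s.drop k)).head? := by
  rw [← pbB_drop s k hk, List.head?_drop]

theorem pbB_head? (s : List Char) : (pbB s).head? = some (partsQ s 0) := by
  cases s <;> simp [pbB, partsQ]

theorem pbB_lookup (s : List Char) (j m : Nat) (h : j + m ≤ s.length) :
    (pbB (s.drop j))[m]? = some (partsQ s (j + m)) := by
  have hlen : m ≤ (s.drop j).length := by simp; omega
  rw [pbB_get_head (s.drop j) m hlen, List.drop_drop, pbB_head?]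
  unfold partsQ
  simp

theorem pbB_oob (s : List Char) (j m : Nat) (hm : 1 ≤ m) (h : s.length < j + m) :
    (pbB (s.drop j))[m]? = none := by
  apply List.getElem?_eq_none
  rw [pbB_length]
  simp
  omega

theorem partsQ_stop (s : List Char) (j : Nat) (hj : s.length ≤ j) : partsQ s j = some [] := by
  unfold partsQ
  rw [List.drop_eq_nil_of_le hj]
  simp [pbB]

theorem partsQ_zero (s : List Char) (j : Nat) (hj : j < s.length) (hz : s[j]? = some '0') :
    partsQ s j = none := by
  unfold partsQ
  rw [List.drop_eq_getElem_cons hj]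
  have hz' : s[j] = '0' := by
    rw [List.getElem?_eq_getElem hj] at hz
    simpa using hz
  simp [pbB, hz']

theorem partsQ_step (s : List Char) (j : Nat) (hj : j < s.length) (hz : s[j]? ≠ some '0') :
    partsQ s j =
      (match (if j + 2 ≤ s.length then partsQ s (j + 2) else none) with
       | some l => some (String.ofList ((s.drop j).take 2) :: l)
       | none =>
         (match (if j + 3 ≤ s.length then partsQ s (j + 3) else none) with
          | some l => some (String.ofList ((s.drop j).take 3) :: l)
          | none => none)) := by
  have hz' : ¬ s[j] = '0' := by
    rw [List.getElem?_eq_getElem hj] at hz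
    simpa using hz
  have hdj : s.drop j = s[j] :: s.drop (j + 1) := List.drop_eq_getElem_cons hj
  have htk2 : (s.drop j).take 2 = s[j] :: (s.drop (j + 1)).take 1 := by rw [hdj]; rfl
  have htk3 : (s.drop j).take 3 = s[j] :: (s.drop (j + 1)).take 2 := by rw [hdj]; rfl
  conv_lhs => rw [partsQ, hdj]
  show (pbB (s[j] :: s.drop (j+1))).headD none = _
  rw [pbB]
  simp only [List.headD_cons, hz', ite_true, ne_eq, not_false_iff]
  rw [← htk2, ← htk3]
  by_cases h2 : j + 2 ≤ s.length
  · rw [show (pbB (s.drop (j+1)))[1]? = some (partsQ s (j + 2)) by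
      have := pbB_lookup s (j+1) 1 (by omega); simpa [Nat.add_assoc] using this]
    simp only [if_pos h2]
    cases hp2 : partsQ s (j + 2) with
    | some l => simp
    | none =>
      simp only
      by_cases h3 : j + 3 ≤ s.length
      · rw [show (pbB (s.drop (j+1)))[2]? = some (partsQ s (j + 3)) by
          have := pbB_lookup s (j+1) 2 (by omega); simpa [Nat.add_assoc] using this]
        simp only [if_pos h3]
        cases partsQ s (j + 3) <;> rfl
      · rw [show (pbB (s.drop (j+1)))[2]? = none from pbB_oob s (j+1) 2 (by omega) (by omega)]
        simp [h3]
  · rw [show (pbB (s.drop (j+1)))[1]? = none from pbB_oob s (j+1) 1 (by omega) (by omega)]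
    simp only [if_neg h2]
    by_cases h3 : j + 3 ≤ s.length
    · rw [show (pbB (s.drop (j+1)))[2]? = some (partsQ s (j + 3)) by
        have := pbB_lookup s (j+1) 2 (by omega); simpa [Nat.add_assoc] using this]
      simp only [if_pos h3]
      cases partsQ s (j + 3) <;> rfl
    · rw [show (pbB (s.drop (j+1)))[2]? = none from pbB_oob s (j+1) 2 (by omega) (by omega)]
      simp [h3]

theorem partsQ_take2 (s : List Char) (j : Nat) (l : List String) (hj2 : j + 2 ≤ s.length)
    (hz : s[j]? ≠ some '0') (hl : partsQ s (j + 2) = some l) :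
    partsQ s j = some (String.ofList ((s.drop j).take 2) :: l) := by
  rw [partsQ_step s j (by omega) hz]
  simp [hj2, hl]

theorem partsQ_take3 (s : List Char) (j : Nat) (l : List String) (hj3 : j + 3 ≤ s.length)
    (hz : s[j]? ≠ some '0') (h2 : s.length < j + 2 ∨ partsQ s (j + 2) = none)
    (hl : partsQ s (j + 3) = some l) :
    partsQ s j = some (String.ofList ((s.drop j).take 3) :: l) := by
  rw [partsQ_step s j (by omega) hz]
  rcases h2 with h2 | h2
  · simp [show ¬ j + 2 ≤ s.length by omega, hj3, hl]
  · simp [h2, hj3, hl]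

theorem partsQ_none (s : List Char) (j : Nat) (hj : j < s.length)
    (hd2 : s.length < j + 2 ∨ partsQ s (j + 2) = none ∨ s[j]? = some '0')
    (hd3 : s.length < j + 3 ∨ partsQ s (j + 3) = none ∨ s[j]? = some '0') :
    partsQ s j = none := by
  by_cases hz : s[j]? = some '0'
  · exact partsQ_zero s j hj hz
  · rw [partsQ_step s j hj hz]
    have hd2' : s.length < j + 2 ∨ partsQ s (j + 2) = none := by tauto
    have hd3' : s.length < j + 3 ∨ partsQ s (j + 3) = none := by tauto
    have h2' : (if j + 2 ≤ s.length then partsQ s (j + 2) else none) = none := by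
      rcases hd2' with h2 | h2
      · simp [show ¬ j + 2 ≤ s.length by omega]
      · simp [h2]
    have h3' : (if j + 3 ≤ s.length then partsQ s (j + 3) else none) = none := by
      rcases hd3' with h3 | h3
      · simp [show ¬ j + 3 ≤ s.length by omega]
      · simp [h3]
    rw [h2', h3']

theorem partsQ_isSome_iff (s : List Char) (j : Nat) (hj : j ≤ s.length) :
    (partsQ s j).isSome = true ↔ (j = s.length ∨ canFrom s j 2 = true) := by
  rcases Nat.lt_or_ge j s.length with hlt | hge
  swap
  · have := partsQ_stop s j hge
    simp [this]
    omega
  constructor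
  · intro hs
    right
    by_contra hc
    unfold canFrom at hc
    simp only [Bool.and_eq_true, Bool.or_eq_true, decide_eq_true_eq, bne_iff_ne, ne_eq] at hc
    by_cases hz : s[j]? = some '0'
    · rw [partsQ_zero s j hlt hz] at hs; simp at hs
    · have hd2 : s.length < j + 2 ∨ partsQ s (j + 2) = none := by
        rcases Nat.lt_or_ge s.length (j + 2) with h | h
        · exact Or.inl h
        · right
          rcases Option.eq_none_or_eq_some (partsQ s (j + 2)) with hn | ⟨v, hv⟩
          · exact hn
          · exact absurd ⟨hz, Or.inl ⟨⟨by omega, h⟩, by simp [hv]⟩⟩ hc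
      have hd3 : s.length < j + 3 ∨ partsQ s (j + 3) = none := by
        rcases Nat.lt_or_ge s.length (j + 3) with h | h
        · exact Or.inl h
        · right
          rcases Option.eq_none_or_eq_some (partsQ s (j + 3)) with hn | ⟨v, hv⟩
          · exact hn
          · exact absurd ⟨hz, Or.inr ⟨⟨by omega, h⟩, by simp [hv]⟩⟩ hc
      rw [partsQ_none s j hlt (by tauto) (by tauto)] at hs
      simp at hs
  · intro h
    rcases h with h | h
    · omega
    · unfold canFrom at h
      simp only [Bool.and_eq_true, Bool.or_eq_true, decide_eq_true_eq, bne_iff_ne, ne_eq] at h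
      obtain ⟨hz, h⟩ := h
      rcases h with ⟨⟨-, h2⟩, hs2⟩ | ⟨⟨-, h3⟩, hs3⟩
      · obtain ⟨l, hl⟩ := Option.isSome_iff_exists.mp hs2
        rw [partsQ_take2 s j l h2 hz hl]
        rfl
      · rcases Option.eq_none_or_eq_some (partsQ s (j + 2)) with hn | ⟨v, hv⟩
        · obtain ⟨l, hl⟩ := Option.isSome_iff_exists.mp hs3
          rw [partsQ_take3 s j l h3 hz (Or.inr hn) hl]
          rfl
        · by_cases h2 : j + 2 ≤ s.length
          · rw [partsQ_take2 s j v h2 hz hv]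
            rfl
          · obtain ⟨l, hl⟩ := Option.isSome_iff_exists.mp hs3
            rw [partsQ_take3 s j l h3 hz (Or.inl (by omega)) hl]
            rfl

theorem canFrom_23 (s : List Char) (i : Nat)
    (h : s.length < i + 2 ∨ partsQ s (i + 2) = none ∨ s[i]? = some '0') :
    canFrom s i 2 = canFrom s i 3 := by
  unfold canFrom
  rcases h with h | h | h
  · simp [show ¬ i + 2 ≤ s.length by omega]
  · simp [h]
  · simp [h]

theorem canFrom_34 (s : List Char) (i : Nat)
    (h : s.length < i + 3 ∨ partsQ s (i + 3) = none ∨ s[i]? = some '0') :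
    canFrom s i 3 = canFrom s i 4 := by
  unfold canFrom
  rcases h with h | h | h
  · simp [show ¬ i + 3 ≤ s.length by omega]
  · simp [h]
  · simp [h]

theorem finalAns_congr (s : List Char) (stack : List (Nat × Nat)) (i k k' : Nat)
    (h : canFrom s i k = canFrom s i k') : finalAns s stack i k = finalAns s stack i k' := by
  rw [finalAns.eq_def, finalAns.eq_def, h]


theorem canFrom_mono (s : List Char) (i k : Nat) (hk : canFrom s i k = true) :
    canFrom s i 2 = true := by
  unfold canFrom at hk ⊢
  simp only [Bool.and_eq_true, Bool.or_eq_true, decide_eq_true_eq] at hk ⊢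
  obtain ⟨hz, hk⟩ := hk
  rcases hk with ⟨⟨-, hb⟩, hs⟩ | ⟨⟨-, hb⟩, hs⟩
  · exact ⟨hz, Or.inl ⟨⟨by omega, hb⟩, hs⟩⟩
  · exact ⟨hz, Or.inr ⟨⟨by omega, hb⟩, hs⟩⟩

theorem dpA_drop (s : List Char) (k : Nat) (hk : k ≤ s.length) :
    (dpA s).drop k = dpA (s.drop k) := by
  induction s generalizing k with
  | nil =>
    have hk0 : k = 0 := Nat.le_zero.mp hk
    subst hk0
    simp
  | cons c rest ih =>
    cases k with
    | zero => simp
    | succ k =>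
      have : (dpA (c :: rest)).drop (k + 1) = (dpA rest).drop k := by
        simp [dpA]
      rw [this, ih k (by simpa using hk)]
      simp

theorem dpA_eq_map (s : List Char) :
    dpA s = (pbB s).map (fun o => if o.isSome then (1 : Int) else 0) := by
  induction s with
  | nil => simp [dpA, pbB]
  | cons c rest ih =>
    simp only [dpA, pbB, List.map_cons, ih, List.getElem?_map]
    congr 1
    by_cases hc : c = '0'
    · simp [hc]
    · rcases h1 : (pbB rest)[1]? with _ | (_ | l1) <;>
        rcases h2 : (pbB rest)[2]? with _ | (_ | l2) <;>
          simp_all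

theorem recon_eq (n : Nat) :
    ∀ (s : List Char) (l : List String), s.length ≤ n →
      (pbB s).head? = some (some l) → reconA (dpA s) s = l := by
  induction n with
  | zero =>
    intro s l hs h
    match s, hs with
    | [], _ =>
      simp [pbB] at h
      simp [reconA, h]
  | succ n ih =>
    intro s l hs h
    match s with
    | [] =>
      simp [pbB] at h
      simp [reconA, h]
    | c :: rest =>
      by_cases hc : c = '0'
      · simp [pbB, hc] at h
      · rw [reconA]
        rcases h1 : (pbB rest)[1]? with _ | (_ | l1)
        · rcases h2 : (pbB rest)[2]? with _ | (_ | l2)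
          · simp [pbB, hc, h1, h2] at h
          · simp [pbB, hc, h1, h2] at h
          · have hlen : 2 ≤ rest.length := by
              obtain ⟨hlt, -⟩ := List.getElem?_eq_some_iff.mp h2
              rw [pbB_length] at hlt; omega
            have hcond : (dpA (c :: rest))[2]? = none := by
              simp [dpA, dpA_eq_map, h1]
            have hl : l = String.ofList (c :: rest.take 2) :: l2 := by
              simp [pbB, hc, h1, h2] at h
              exact h.symm
            have hdrop : (dpA (c :: rest)).drop 3 = dpA (rest.drop 2) := by
              have : (dpA (c :: rest)).drop 3 = (dpA rest).drop 2 := by simp [dpA]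
              rw [this, dpA_drop rest 2 hlen]
            have hrec : reconA ((dpA (c :: rest)).drop 3) (rest.drop 2) = l2 := by
              have hh : (pbB (rest.drop 2)).head? = some (some l2) := by
                rw [← pbB_get_head rest 2 hlen]; exact h2
              rw [hdrop]
              exact ih (rest.drop 2) l2 (by simp at hs ⊢; omega) hh
            simp [hcond, hrec, hl]
        · rcases h2 : (pbB rest)[2]? with _ | (_ | l2)
          · simp [pbB, hc, h1, h2] at h
          · simp [pbB, hc, h1, h2] at h
          · have hlen : 2 ≤ rest.length := by
              obtain ⟨hlt, -⟩ := List.getElem?_eq_some_iff.mp h2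
              rw [pbB_length] at hlt; omega
            have hcond : (dpA (c :: rest))[2]? = some 0 := by
              simp [dpA, dpA_eq_map, h1]
            have hl : l = String.ofList (c :: rest.take 2) :: l2 := by
              simp [pbB, hc, h1, h2] at h
              exact h.symm
            have hdrop : (dpA (c :: rest)).drop 3 = dpA (rest.drop 2) := by
              have : (dpA (c :: rest)).drop 3 = (dpA rest).drop 2 := by simp [dpA]
              rw [this, dpA_drop rest 2 hlen]
            have hrec : reconA ((dpA (c :: rest)).drop 3) (rest.drop 2) = l2 := by
              have hh : (pbB (rest.drop 2)).head? = some (some l2) := by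
                rw [← pbB_get_head rest 2 hlen]; exact h2
              rw [hdrop]
              exact ih (rest.drop 2) l2 (by simp at hs ⊢; omega) hh
            simp [hcond, hrec, hl]
        · have hlen : 1 ≤ rest.length := by
            obtain ⟨hlt, -⟩ := List.getElem?_eq_some_iff.mp h1
            rw [pbB_length] at hlt; omega
          have hcond : (dpA (c :: rest))[2]? = some 1 := by
            simp [dpA, dpA_eq_map, h1]
          have hl : l = String.ofList (c :: rest.take 1) :: l1 := by
            simp [pbB, hc, h1] at h
            exact h.symm
          have hdrop : (dpA (c :: rest)).drop 2 = dpA (rest.drop 1) := by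
            have : (dpA (c :: rest)).drop 2 = (dpA rest).drop 1 := by simp [dpA]
            rw [this, dpA_drop rest 1 hlen]
          have hrec : reconA ((dpA (c :: rest)).drop 2) rest.tail = l1 := by
            have hh : (pbB (rest.drop 1)).head? = some (some l1) := by
              rw [← pbB_get_head rest 1 hlen]; exact h1
            have := ih (rest.drop 1) l1 (by simp at hs ⊢; omega) hh
            rw [hdrop]
            simpa [List.drop_one] using this
          simp [hcond, hrec, hl]

theorem solve_eq_ref (p : String) :
    solve p =
      (match (pbB p.toList).headD none with
       | none => ("NO", [])
       | some l => ("YES", l)) := by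
  unfold solve
  obtain ⟨e, tl, hpb⟩ : ∃ e tl, pbB p.toList = e :: tl := by
    cases hs : p.toList with
    | nil => exact ⟨_, _, rfl⟩
    | cons c r => exact ⟨_, _, rfl⟩
  cases e with
  | none =>
    have hhd : (dpA p.toList).headD 0 = 0 := by rw [dpA_eq_map, hpb]; simp
    rw [hpb, if_pos hhd]
    rfl
  | some l =>
    have hrec : reconA (dpA p.toList) p.toList = l :=
      recon_eq p.toList.length p.toList l le_rfl (by rw [hpb]; rfl)
    have hhd : ¬ (dpA p.toList).headD 0 = 0 := by rw [dpA_eq_map, hpb]; simp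
    rw [hpb, if_neg hhd, hrec]
    rfl

theorem dfs_eq (s : List Char) :
    ∀ (N : Nat) (stack : List (Nat × Nat)) (i k : Nat) (failed : Finset Nat)
      (h : dfsInv s.length stack i k failed),
      dfsMeas s stack i k failed < N →
      (∀ x ∈ failed, partsQ s x = none) →
      (3 ≤ k → s.length < i + 2 ∨ partsQ s (i + 2) = none ∨ s[i]? = some '0') →
      (4 ≤ k → s.length < i + 3 ∨ partsQ s (i + 3) = none ∨ s[i]? = some '0') →
      Linked s stack i →
      dfs s stack i k failed h = finalAns s stack i k := by
  intro N
  induction N with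
  | zero => intro stack i k failed h hm _ _ _ _; exact absurd hm (Nat.not_lt_zero _)
  | succ N ih =>
    intro stack i k failed h hm hF hk3 hk4 hL
    obtain ⟨h2k, hin, hif, hfb, hfr, hpw⟩ := h
    rw [dfs.eq_def]
    by_cases hn : i = s.length
    · rw [dif_pos hn, finalAns.eq_def, if_pos (Or.inl hn), hn,
        partsQ_stop s s.length (le_refl _)]
      simp
    · rw [dif_neg hn]
      by_cases hg : k ≤ 3 ∧ i + k ≤ s.length ∧ s[i]? ≠ some '0' ∧ (i + k) ∉ failed
      · rw [dif_pos hg]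
        obtain ⟨hkle3, hkn, hz, hnf⟩ := hg
        have hmeas : dfsMeas s ((i, k) :: stack) (i + k) 2 failed < N := by
          have := meas_desc s stack i k failed h2k hkn; omega
        have hL' : Linked s ((i, k) :: stack) (i + k) := by
          refine ⟨rfl, hz, by omega, ?_, hL⟩
          intro hke
          rcases hk3 (by omega) with hd | hd | hd
          · exact Or.inl hd
          · exact Or.inr hd
          · exact absurd hd hz
        rw [ih ((i, k) :: stack) (i + k) 2 failed _ hmeas hF
          (fun hh => absurd hh (by omega)) (fun hh => absurd hh (by omega)) hL']
        by_cases hps : (partsQ s (i + k)).isSome = true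
        · obtain ⟨l, hl⟩ := Option.isSome_iff_exists.mp hps
          have hdead2 : k = 3 → s.length < i + 2 ∨ partsQ s (i + 2) = none := by
            intro hke
            rcases hk3 (by omega) with hd | hd | hd
            · exact Or.inl hd
            · exact Or.inr hd
            · exact absurd hd hz
          have hpi : partsQ s i = some (String.ofList ((s.drop i).take k) :: l) := by
            rcases (show k = 2 ∨ k = 3 by omega) with hke | hke
            · subst hke; exact partsQ_take2 s i l hkn hz hl
            · subst hke; exact partsQ_take3 s i l hkn hz (hdead2 rfl) hl
          have hc1 : i + k = s.length ∨ canFrom s (i + k) 2 = true :=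
            (partsQ_isSome_iff s (i + k) hkn).mp hps
          have hcanik : canFrom s i k = true := by
            unfold canFrom
            simp only [Bool.and_eq_true, Bool.or_eq_true, decide_eq_true_eq, bne_iff_ne, ne_eq]
            refine ⟨hz, ?_⟩
            rcases (show k = 2 ∨ k = 3 by omega) with hke | hke
            · subst hke; exact Or.inl ⟨⟨by omega, hkn⟩, hps⟩
            · subst hke; exact Or.inr ⟨⟨by omega, hkn⟩, hps⟩
          rw [finalAns.eq_def, finalAns.eq_def, if_pos hc1, if_pos (Or.inr hcanik), hpi]
          simp [hl]
        · have hnone : partsQ s (i + k) = none :=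
            Option.not_isSome_iff_eq_none.mp (by simpa using hps)
          have hcond : ¬ (i + k = s.length ∨ canFrom s (i + k) 2 = true) := by
            intro hcc
            have := (partsQ_isSome_iff s (i + k) hkn).mpr hcc
            rw [hnone] at this
            simp at this
          conv_lhs => rw [finalAns.eq_def]
          rw [if_neg hcond]
          rcases (show k = 2 ∨ k = 3 by omega) with hke | hke
          · subst hke
            exact (finalAns_congr s stack i 2 3 (canFrom_23 s i (Or.inr (Or.inl hnone)))).symm
          · subst hke
            exact (finalAns_congr s stack i 3 4 (canFrom_34 s i (Or.inr (Or.inl hnone)))).symm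
      · rw [dif_neg hg]
        by_cases hk2 : k = 2
        · rw [dif_pos hk2]
          subst hk2
          have hd : s.length < i + 2 ∨ partsQ s (i + 2) = none ∨ s[i]? = some '0' := by
            by_cases hb : i + 2 ≤ s.length
            · by_cases hz : s[i]? = some '0'
              · exact Or.inr (Or.inr hz)
              · have hmem : i + 2 ∈ failed := by
                  by_contra hnf
                  exact hg ⟨by omega, hb, hz, hnf⟩
                exact Or.inr (Or.inl (hF _ hmem))
            · exact Or.inl (by omega)
          have hmeas : dfsMeas s stack i 3 failed < N := by
            have := meas_bump s stack i failed; omega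
          rw [ih stack i 3 failed _ hmeas hF (fun _ => hd)
            (fun hh => absurd hh (by omega)) hL]
          exact finalAns_congr s stack i 3 2 (canFrom_23 s i hd).symm
        · rw [dif_neg hk2]
          have hiln : i < s.length := by omega
          have hd3 : s.length < i + 3 ∨ partsQ s (i + 3) = none ∨ s[i]? = some '0' := by
            rcases Nat.lt_or_ge k 4 with hklt | hkge
            · have hke : k = 3 := by omega
              by_cases hb : i + 3 ≤ s.length
              · by_cases hz : s[i]? = some '0'
                · exact Or.inr (Or.inr hz)
                · have hmem : i + 3 ∈ failed := by
                    by_contra hnf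
                    refine hg ?_
                    subst hke
                    exact ⟨by omega, hb, hz, hnf⟩
                  exact Or.inr (Or.inl (hF _ hmem))
              · exact Or.inl (by omega)
            · exact hk4 hkge
          have hni : partsQ s i = none := partsQ_none s i hiln (hk3 (by omega)) hd3
          have hcond : ¬ (i = s.length ∨ canFrom s i k = true) := by
            intro hcc
            rcases hcc with hcc | hcc
            · exact hn hcc
            · have := (partsQ_isSome_iff s i (by omega)).mpr (Or.inr (canFrom_mono s i k hcc))
              rw [hni] at this
              simp at this
          cases stack with
          | nil =>
            rw [finalAns.eq_def, if_neg hcond]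
          | cons f rest =>
            obtain ⟨q, kq⟩ := f
            obtain ⟨hqk, hqz, hkq23, hkq3d, hLrest⟩ := hL
            change dfs s rest q (kq + 1) (insert i failed) _ = _
            have hmeas : dfsMeas s rest q (kq + 1) (insert i failed) < N := by
              have := meas_pop s q kq i k rest failed hif hfb hiln; omega
            have hF' : ∀ x ∈ insert i failed, partsQ s x = none := by
              intro x hx
              rcases Finset.mem_insert.mp hx with rfl | hx
              · exact hni
              · exact hF x hx
            have hk3' : 3 ≤ kq + 1 →
                s.length < q + 2 ∨ partsQ s (q + 2) = none ∨ s[q]? = some '0' := by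
              intro _
              rcases hkq23 with hke | hke
              · refine Or.inr (Or.inl ?_)
                rw [show q + 2 = i by omega]
                exact hni
              · rcases hkq3d hke with hd | hd
                · exact Or.inl hd
                · exact Or.inr (Or.inl hd)
            have hk4' : 4 ≤ kq + 1 →
                s.length < q + 3 ∨ partsQ s (q + 3) = none ∨ s[q]? = some '0' := by
              intro h4
              have hke : kq = 3 := by omega
              refine Or.inr (Or.inl ?_)
              rw [show q + 3 = i by omega]
              exact hni
            rw [ih rest q (kq + 1) (insert i failed) _ hmeas hF' hk3' hk4' hLrest]
            conv_rhs => rw [finalAns.eq_def]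
            rw [if_neg hcond]

theorem solve_alt_eq (p : String) : solve_alt p = finalAns p.toList [] 0 2 := by
  unfold solve_alt
  apply dfs_eq p.toList (dfsMeas p.toList [] 0 2 ∅ + 1)
  · omega
  · intro x hx; simp at hx
  · intro hh; exact absurd hh (by omega)
  · intro hh; exact absurd hh (by omega)
  · trivial

-- ===== VERDICT (by name: the statement is the Claim_ definition above) =====
theorem solve_spec : Claim_equal_solve := by
  intro p _
  unfold Spec_solve
  rw [solve_eq_ref p, solve_alt_eq p, finalAns.eq_def]
  have h00 : partsQ p.toList 0 = (pbB p.toList).headD none := by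
    unfold partsQ; simp
  cases hq : (pbB p.toList).headD none with
  | none =>
    rw [if_neg ?_]
    · intro hcc
      have := (partsQ_isSome_iff p.toList 0 (by omega)).mpr ?_
      · rw [h00, hq] at this; simp at this
      · rcases hcc with hcc | hcc
        · exact Or.inl hcc
        · exact Or.inr hcc
  | some l =>
    have hs : (partsQ p.toList 0).isSome = true := by rw [h00, hq]; rfl
    rw [if_pos ((partsQ_isSome_iff p.toList 0 (by omega)).mp hs),
      show partsQ p.toList 0 = some l from h00.trans hq]
    simp
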